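-- pv_equiv track=rewrite | github.com/MichaelLangbein/logic | ie/substitution.py | dictIntersection
-- ===== SOURCE A (Python) =====
-- def tolist(something):
--     try:
--         return list(something)
--     except:
--         return [something]
--
-- def listUnion(list1, list2):
--     if list1 is None:
--         return list2
--     if list2 is None:
--         return list1
--     uList = list1
--     for entry in list2:
--         if entry not in list1:
--             uList.append(entry)
--     return uList
--
-- def listIntersection(list1, list2):
--     if list1 is None:
--         return list2
--     if list2 is None:
--         return list1
--     iList = []
--     for entry in list1:
--         if entry in list2:
--             iList.append(entry)
--     return iList
--
-- def dictIntersection(dict1, dict2):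
--     if dict1 is None:
--         return dict2
--     if dict2 is None:
--         return dict1
--     iDict = {}
--     keys = listUnion(tolist(dict1.keys()), tolist(dict2.keys()))
--     for key in keys:
--         d1v = d2v = None
--         if key in dict1:
--             d1v = tolist(dict1[key])
--         if key in dict2:
--             d2v = tolist(dict2[key])
--         iDict[key] = listIntersection(d1v, d2v)
--     return iDict
-- ===== SOURCE B (Python) =====
-- def tolist(something):
--     try:
--         return list(something)
--     except:
--         return [something]
--
-- def dictIntersection(dict1, dict2):
--     if dict1 is None:
--         return dict2
--     if dict2 is None:
--         return dict1
--     out = {}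
--     for k, v in list(dict1.items()) + list(dict2.items()):
--         v = tolist(v)
--         if k in out:
--             w = set(v)
--             out[k] = [e for e in out[k] if e in w]
--         else:
--             out[k] = v
--     return out
-- ===== Notes on version B (the rewrite author's own statement) =====
-- stated objective: faster
-- what changed: Replaces A's precomputed key-union list and the listUnion/listIntersection helpers by ONE fold over the concatenated item streams dict1.items()+dict2.items() with an insert-or-intersect accumulator dict: first occurrence of a key installs its list, a second occurrence intersects the stored list with a set of the new one, so no key-union and no cross-dict membership tests exist at all.
import Mathlib
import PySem

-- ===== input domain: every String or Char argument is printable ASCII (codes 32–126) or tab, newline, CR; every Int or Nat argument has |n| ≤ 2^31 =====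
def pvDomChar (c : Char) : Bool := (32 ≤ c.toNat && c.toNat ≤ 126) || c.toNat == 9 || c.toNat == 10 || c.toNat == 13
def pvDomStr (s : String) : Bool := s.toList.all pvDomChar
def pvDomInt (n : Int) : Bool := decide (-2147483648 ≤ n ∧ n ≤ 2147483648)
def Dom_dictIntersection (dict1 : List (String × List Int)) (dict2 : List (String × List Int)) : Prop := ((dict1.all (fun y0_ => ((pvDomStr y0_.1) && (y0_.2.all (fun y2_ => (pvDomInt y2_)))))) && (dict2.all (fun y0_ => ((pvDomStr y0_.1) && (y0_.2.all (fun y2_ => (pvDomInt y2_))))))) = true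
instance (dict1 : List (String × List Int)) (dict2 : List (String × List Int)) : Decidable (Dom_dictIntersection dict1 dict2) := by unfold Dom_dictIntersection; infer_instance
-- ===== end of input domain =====

-- B replaces A's precomputed key-union list and the listUnion/listIntersection helpers by a single
-- fold over the concatenated item streams dict1.items()+dict2.items() with an insert-or-intersect
-- accumulator dict; objective: faster (no quadratic key union, no cross-dict list scans).

-- ===== PORT A =====
-- tolist(v) for v : List Int is list(v), a copy of v.
def pvTolist (v : List Int) : List Int := v

-- listUnion (None guards unreachable here): uList aliases list1, so the membership test
-- sees the growing list.
def pvListUnion (list1 list2 : List String) : List String :=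
  list2.foldl (fun uList entry => if entry ∈ uList then uList else uList ++ [entry]) list1

-- listIntersection on the optional (None-able) values d1v/d2v.
def pvListIntersection (list1 list2 : Option (List Int)) : Option (List Int) :=
  match list1, list2 with
  | none, _ => list2
  | some _, none => list1
  | some l1, some l2 =>
      some (l1.foldl (fun iList entry => if entry ∈ l2 then iList ++ [entry] else iList) [])

def dictIntersection (dict1 : List (String × List Int)) (dict2 : List (String × List Int)) : List (String × List Int) :=
  let D1 := PySem.Dict.ofList dict1
  let D2 := PySem.Dict.ofList dict2
  let keys := pvListUnion (D1.keys) (D2.keys)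
  let iDict := keys.foldl (fun d key =>
      let d1v : Option (List Int) := if D1.contains key then some (pvTolist (D1.getD key [])) else none
      let d2v : Option (List Int) := if D2.contains key then some (pvTolist (D2.getD key [])) else none
      -- key comes from the union of the two key sets, so the 'both None' case never happens; [] there
      d.insert key ((pvListIntersection d1v d2v).getD [])) PySem.Dict.empty
  iDict.items

-- ===== PORT B =====
-- one step of B's single loop: first occurrence installs the (copied) list,
-- a second occurrence intersects the stored list with a set built from the new one
def pvStep (d : PySem.Dict String (List Int)) (kv : String × List Int) : PySem.Dict String (List Int) :=
  match d.get? kv.1 with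
  | some cur => d.insert kv.1 (cur.filter (fun e => (PySem.Set.ofList (pvTolist kv.2)).contains e))
  | none => d.insert kv.1 (pvTolist kv.2)

def dictIntersection_alt (dict1 : List (String × List Int)) (dict2 : List (String × List Int)) : List (String × List Int) :=
  let D1 := PySem.Dict.ofList dict1
  let D2 := PySem.Dict.ofList dict2
  ((D1.items ++ D2.items).foldl pvStep PySem.Dict.empty).items

-- ===== PRECONDITION & SPEC =====
def Spec_dictIntersection (dict1 : List (String × List Int)) (dict2 : List (String × List Int)) (out : List (String × List Int)) : Prop := out = dictIntersection_alt dict1 dict2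
instance (dict1 : List (String × List Int)) (dict2 : List (String × List Int)) (out : List (String × List Int)) : Decidable (Spec_dictIntersection dict1 dict2 out) := by unfold Spec_dictIntersection; infer_instance

-- ===== CLAIM (what is proved, stated in full; the proofs are below) =====
def Claim_equal_dictIntersection : Prop := ∀ (dict1 : List (String × List Int)) (dict2 : List (String × List Int)), Dom_dictIntersection dict1 dict2 → Spec_dictIntersection dict1 dict2 (dictIntersection dict1 dict2)

-- ===== LEMMAS AND PROOFS =====

-- the common canonical form both ports are reduced to
def pvCanon (dict1 : List (String × List Int)) (dict2 : List (String × List Int)) : List (String × List Int) :=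
  let D1 := PySem.Dict.ofList dict1
  let D2 := PySem.Dict.ofList dict2
  (D1.items.map (fun kv =>
      match D2.get? kv.1 with
      | some w => (kv.1, kv.2.filter (fun e => (PySem.Set.ofList w).contains e))
      | none => kv))
  ++ D2.items.filter (fun kv => !(D1.contains kv.1))

-- listUnion of a Nodup second list appends exactly the entries missing from list1.
theorem pvListUnion_eq (l2 l1 : List String) (h2 : l2.Nodup) :
    pvListUnion l1 l2 = l1 ++ l2.filter (fun e => decide (e ∉ l1)) := by
  induction l2 generalizing l1 with
  | nil => simp [pvListUnion]
  | cons x t ih =>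
    simp only [List.nodup_cons] at h2
    show ((x :: t).foldl _ l1) = _
    rw [List.foldl_cons]
    by_cases hx : x ∈ l1
    · simpa [hx] using ih l1 h2.2
    · simp only [hx, if_false]
      rw [show (t.foldl (fun uList entry => if entry ∈ uList then uList else uList ++ [entry]) (l1 ++ [x])) = pvListUnion (l1 ++ [x]) t from rfl]
      rw [ih (l1 ++ [x]) h2.2]
      have hf : t.filter (fun e => decide (e ∉ l1 ++ [x])) = t.filter (fun e => decide (e ∉ l1)) := by
        apply List.filter_congr
        intro a ha
        have hax : a ≠ x := fun h => h2.1 (h ▸ ha)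
        simp [List.mem_append, hax]
      rw [hf]
      simp [hx, List.append_assoc]

-- set-membership test = list-membership test
theorem set_contains_eq (w : List Int) (e : Int) :
    (PySem.Set.ofList w).contains e = decide (e ∈ w) := by
  by_cases h : e ∈ w <;>
    simp [PySem.Set.contains, PySem.Set.mem_ofList, h]

theorem A_eq_canon (dict1 dict2 : List (String × List Int)) :
    dictIntersection dict1 dict2 = pvCanon dict1 dict2 := by
  simp only [dictIntersection, pvCanon, pvTolist]
  set D1 := PySem.Dict.ofList dict1 with hD1
  set D2 := PySem.Dict.ofList dict2 with hD2
  have hn1 : D1.keys.Nodup := PySem.Dict.nodup_keys_ofList _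
  have hn2 : D2.keys.Nodup := PySem.Dict.nodup_keys_ofList _
  set V : String → List Int := fun key =>
    (pvListIntersection (if D1.contains key then some (D1.getD key []) else none)
      (if D2.contains key then some (D2.getD key []) else none)).getD [] with hV
  rw [pvListUnion_eq _ _ hn2]
  set p : String → Bool := fun e => decide (e ∉ D1.keys) with hp
  have hkeysnd : (D1.keys ++ D2.keys.filter p).Nodup := by
    refine List.Nodup.append hn1 (hn2.filter _) ?_
    intro a ha1 ha2
    have := List.of_mem_filter ha2
    simp [hp] at this
    exact this ha1
  have hitems :
      ((D1.keys ++ D2.keys.filter p).foldl (fun d key => d.insert key (V key)) PySem.Dict.empty).items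
        = (D1.keys ++ D2.keys.filter p).map (fun k => (k, V k)) := by
    have h := PySem.Dict.items_foldl_insert_fresh (l := D1.keys ++ D2.keys.filter p)
      (k := fun a => a) (v := V) (d := PySem.Dict.empty)
      (by intro a _; simp [PySem.Dict.contains_empty])
      (by simpa using hkeysnd)
    simpa using h
  rw [hitems]
  rw [List.map_append]
  congr 1
  · -- dict1 keys
    rw [PySem.Dict.items_eq_map_keys D1 hn1 [], List.map_map]
    apply List.map_congr_left
    intro k hk
    have hc1 : D1.contains k = true := by
      simp [PySem.Dict.contains_eq_decide_mem_keys, hk]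
    by_cases hc2 : D2.contains k = true
    · have hsome : D2.get? k = some (D2.getD k []) := by
        have hiso : (D2.get? k).isSome := by
          rw [← PySem.Dict.contains_eq_isSome_get?]; exact hc2
        obtain ⟨w, hw⟩ := Option.isSome_iff_exists.mp hiso
        have hg : D2.getD k [] = w := by
          rw [PySem.Dict.getD_eq_get?_getD, hw]; rfl
        rw [hw, hg]
      simp only [Function.comp, hsome, hV, hc1, hc2, if_true, pvListIntersection, Option.getD_some]
      rw [PySem.List.foldl_append_ite_eq_filter]
      simp only [List.nil_append]
      simp only [set_contains_eq]
    · have hnone : D2.get? k = none := by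
        rw [PySem.Dict.get?_eq_none_iff_contains]
        simpa using hc2
      simp [Function.comp, hnone, hV, hc1, hc2, pvListIntersection]
  · -- dict2-only keys
    rw [PySem.Dict.items_eq_map_keys D2 hn2 [], List.filter_map]
    have hq : (D2.keys.filter fun k => (!(D1.contains ((fun k => (k, D2.getD k [])) k).1)))
        = D2.keys.filter p := by
      apply List.filter_congr
      intro a _
      simp [hp, PySem.Dict.contains_eq_decide_mem_keys]
    rw [show (List.filter ((fun kv => !(D1.contains kv.1)) ∘ fun k => (k, D2.getD k [])) D2.keys)
        = D2.keys.filter (fun k => (!(D1.contains ((fun k => (k, D2.getD k [])) k).1))) from rfl, hq]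
    apply List.map_congr_left
    intro k hk
    have hk2 : k ∈ D2.keys := List.mem_of_mem_filter hk
    have hk1 : k ∉ D1.keys := by
      have := List.of_mem_filter hk
      simpa [hp] using this
    have hc1 : D1.contains k = false := by
      simpa [PySem.Dict.contains_eq_decide_mem_keys] using hk1
    have hc2 : D2.contains k = true := by
      simp [PySem.Dict.contains_eq_decide_mem_keys, hk2]
    simp [hV, hc1, hc2, pvListIntersection]

-- B's loop over a block of FRESH distinct keys just appends the items.
theorem foldl_step_fresh (l : List (String × List Int)) (d : PySem.Dict String (List Int))
    (hfst : (l.map Prod.fst).Nodup) (hfresh : ∀ p ∈ l, d.contains p.1 = false) :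
    (l.foldl pvStep d).items = d.items ++ l := by
  induction l generalizing d with
  | nil => simp
  | cons p t ih =>
    simp only [List.map_cons, List.nodup_cons] at hfst
    have hc : d.contains p.1 = false := hfresh p (List.mem_cons_self ..)
    have hnone : d.get? p.1 = none := by
      rw [PySem.Dict.get?_eq_none_iff_contains]; simp [hc]
    have hstep : pvStep d p = d.insert p.1 p.2 := by
      simp [pvStep, hnone, pvTolist]
    rw [List.foldl_cons, hstep,
      ih (d.insert p.1 p.2) hfst.2 ?_, PySem.Dict.items_insert_of_not_contains d p.2 hc]
    · simp
    · intro q hq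
      have hne : q.1 ≠ p.1 := by
        intro h; exact hfst.1 (h ▸ List.mem_map_of_mem hq)
      rw [PySem.Dict.contains_insert]
      simp [hne, hfresh q (List.mem_cons_of_mem _ hq)]

-- B's loop over a Nodup-key item list l, started from any dict d: each stored list gets
-- intersected with l's entry for its key (described by the abstract lookup F), and l's
-- d-fresh items are appended.
theorem foldl_step_general (l : List (String × List Int)) (d : PySem.Dict String (List Int))
    (F : String → Option (List Int))
    (hnd : d.keys.Nodup) (hfst : (l.map Prod.fst).Nodup)
    (hF1 : ∀ p ∈ l, F p.1 = some p.2)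
    (hF2 : ∀ k, k ∉ l.map Prod.fst → F k = none) :
    (l.foldl pvStep d).items =
      d.items.map (fun kv =>
        match F kv.1 with
        | some w => (kv.1, kv.2.filter (fun e => (PySem.Set.ofList w).contains e))
        | none => kv)
      ++ l.filter (fun kv => !(d.contains kv.1)) := by
  induction l generalizing d F with
  | nil =>
    simp only [List.foldl_nil, List.filter_nil, List.append_nil]
    have : ∀ kv ∈ d.items, (match F kv.1 with
        | some w => (kv.1, kv.2.filter (fun e => (PySem.Set.ofList w).contains e))
        | none => kv) = kv := by
      intro kv _
      rw [hF2 kv.1 (by simp)]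
    rw [List.map_congr_left this, List.map_id']
  | cons p t ih =>
    simp only [List.map_cons, List.nodup_cons] at hfst
    -- the tail's abstract lookup: p.1 is consumed
    set F' : String → Option (List Int) := fun k => if k = p.1 then none else F k with hF'
    have hF1' : ∀ q ∈ t, F' q.1 = some q.2 := by
      intro q hq
      have hne : q.1 ≠ p.1 := by
        intro h; exact hfst.1 (h ▸ List.mem_map_of_mem hq)
      simp only [hF', hne, if_false]
      exact hF1 q (List.mem_cons_of_mem _ hq)
    have hF2' : ∀ k, k ∉ t.map Prod.fst → F' k = none := by
      intro k hk
      by_cases hkp : k = p.1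
      · simp [hF', hkp]
      · simp only [hF', hkp, if_false]
        exact hF2 k (by simp [hkp, hk])
    have hFp : F p.1 = some p.2 := hF1 p (List.mem_cons_self ..)
    by_cases hc : d.contains p.1 = true
    · -- p.1 already stored: intersect in place
      have hiso : (d.get? p.1).isSome := by
        rw [← PySem.Dict.contains_eq_isSome_get?]; exact hc
      obtain ⟨cur, hcur⟩ := Option.isSome_iff_exists.mp hiso
      have hstep : pvStep d p = d.insert p.1 (cur.filter (fun e => (PySem.Set.ofList p.2).contains e)) := by
        simp [pvStep, hcur, pvTolist]
      set d' := d.insert p.1 (cur.filter (fun e => (PySem.Set.ofList p.2).contains e)) with hd'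
      have hkeys' : d'.keys = d.keys := PySem.Dict.keys_insert_of_contains d _ hc
      rw [List.foldl_cons, hstep, ih d' F' (by rw [hkeys']; exact hnd) hfst.2 hF1' hF2']
      have hmap : d'.items.map (fun kv =>
          match F' kv.1 with
          | some w => (kv.1, kv.2.filter (fun e => (PySem.Set.ofList w).contains e))
          | none => kv)
        = d.items.map (fun kv =>
          match F kv.1 with
          | some w => (kv.1, kv.2.filter (fun e => (PySem.Set.ofList w).contains e))
          | none => kv) := by
        rw [hd', PySem.Dict.items_insert_of_contains d _ hc, List.map_map]
        apply List.map_congr_left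
        intro q hq
        by_cases hqp : q.1 = p.1
        · have hq2 : q.2 = cur := by
            have h1 : d.get? q.1 = some q.2 := PySem.Dict.get?_of_mem_items d hq hnd
            rw [hqp, hcur] at h1
            exact (Option.some.injEq _ _ ▸ h1).symm
          simp only [Function.comp, hqp, beq_self_eq_true, if_true, hF', if_pos rfl, hFp, hq2]
        · have hbeq : (q.1 == p.1) = false := by simp [hqp]
          simp [hF', hqp]
      have hfil : t.filter (fun kv => !(d'.contains kv.1)) = t.filter (fun kv => !(d.contains kv.1)) := by
        apply List.filter_congr
        intro q hq
        have hne : q.1 ≠ p.1 := by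
          intro h; exact hfst.1 (h ▸ List.mem_map_of_mem hq)
        rw [hd', PySem.Dict.contains_insert]
        simp [hne]
      rw [hmap, hfil]
      have : (p :: t).filter (fun kv => !(d.contains kv.1)) = t.filter (fun kv => !(d.contains kv.1)) := by
        simp [hc]
      rw [this]
    · -- p.1 fresh: append, stays untouched by the tail
      have hcf : d.contains p.1 = false := by simpa using hc
      have hnone : d.get? p.1 = none := by
        rw [PySem.Dict.get?_eq_none_iff_contains]; simp [hcf]
      have hstep : pvStep d p = d.insert p.1 p.2 := by
        simp [pvStep, hnone, pvTolist]
      set d' := d.insert p.1 p.2 with hd'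
      have hnd' : d'.keys.Nodup := PySem.Dict.nodup_keys_insert _ _ _ hnd
      rw [List.foldl_cons, hstep, ih d' F' hnd' hfst.2 hF1' hF2']
      have hp1 : p.1 ∉ d.keys := by
        intro h
        rw [PySem.Dict.contains_eq_decide_mem_keys] at hcf
        simp [h] at hcf
      have hmap : d'.items.map (fun kv =>
          match F' kv.1 with
          | some w => (kv.1, kv.2.filter (fun e => (PySem.Set.ofList w).contains e))
          | none => kv)
        = d.items.map (fun kv =>
          match F kv.1 with
          | some w => (kv.1, kv.2.filter (fun e => (PySem.Set.ofList w).contains e))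
          | none => kv) ++ [p] := by
        rw [hd', PySem.Dict.items_insert_of_not_contains d p.2 hcf, List.map_append]
        congr 1
        · apply List.map_congr_left
          intro q hq
          have hne : q.1 ≠ p.1 := by
            intro h
            exact hp1 (h ▸ PySem.Dict.mem_keys_of_mem_items _ hq)
          simp only [hF', hne, if_false]
        · simp [hF']
      have hfil : t.filter (fun kv => !(d'.contains kv.1)) = t.filter (fun kv => !(d.contains kv.1)) := by
        apply List.filter_congr
        intro q hq
        have hne : q.1 ≠ p.1 := by
          intro h; exact hfst.1 (h ▸ List.mem_map_of_mem hq)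
        rw [hd', PySem.Dict.contains_insert]
        simp [hne]
      rw [hmap, hfil]
      have : (p :: t).filter (fun kv => !(d.contains kv.1)) = p :: t.filter (fun kv => !(d.contains kv.1)) := by
        simp [hcf]
      rw [this]
      simp [List.append_assoc]

theorem B_eq_canon (dict1 dict2 : List (String × List Int)) :
    dictIntersection_alt dict1 dict2 = pvCanon dict1 dict2 := by
  simp only [dictIntersection_alt, pvCanon]
  set D1 := PySem.Dict.ofList dict1 with hD1
  set D2 := PySem.Dict.ofList dict2 with hD2
  have hn1 : D1.keys.Nodup := PySem.Dict.nodup_keys_ofList _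
  have hn2 : D2.keys.Nodup := PySem.Dict.nodup_keys_ofList _
  rw [List.foldl_append]
  -- phase 1: the dict1 items are all fresh for the empty accumulator, so the fold rebuilds D1
  have hM : D1.items.foldl pvStep PySem.Dict.empty = D1 := by
    apply PySem.Dict.ext
    rw [foldl_step_fresh D1.items PySem.Dict.empty (by exact hn1)
      (by intro q _; simp [PySem.Dict.contains_empty])]
    rfl
  rw [hM]
  -- phase 2: the dict2 items intersect stored lists and append fresh keys
  rw [foldl_step_general D2.items D1 (fun k => D2.get? k) hn1 (by exact hn2)
    (by intro q hq; exact PySem.Dict.get?_of_mem_items D2 hq hn2)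
    (by intro k hk; rw [PySem.Dict.get?_eq_none_iff_not_mem_keys]; exact hk)]

-- ===== VERDICT (by name: the statement is the Claim_ definition above) =====
theorem dictIntersection_spec : Claim_equal_dictIntersection := by
  intro d1 d2 _
  unfold Spec_dictIntersection
  rw [A_eq_canon, B_eq_canon]
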